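-- pv_equiv track=rewrite | github.com/HoseonRyu/nonogram-converter | util/Convert.py | crop
-- ===== SOURCE A (Python) =====
-- def crop(clues):
--     if sum([sum(l) for l in clues]) == 0:
--         return None
--     clues = clues[::-1]
--     while sum(clues[0]) == 0:
--         clues.pop(0)
--     clues = clues[::-1]
--     while sum(clues[0]) == 0:
--         clues.pop(0)
--     return clues
-- ===== SOURCE B (Python) =====
-- def crop(clues):
--     nz = [i for i, row in enumerate(clues) if sum(row) != 0]
--     if not nz:
--         return None
--     return clues[nz[0]:nz[-1] + 1]
-- ===== Notes on version B (the rewrite author's own statement) =====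
-- stated objective: simpler
-- what changed: Replaces A's double reverse + pop(0)-while trimming with a single enumerate scan collecting the nonzero-row indices and one slice clues[first:last+1].
-- intended difference: On inputs whose row sums cancel to a zero grand total although some row has a nonzero sum (possible only with negative entries), A returns None as if the grid were empty, while B returns the rows trimmed to the first..last nonzero-sum row, the intended value since nonzero clue rows exist. — e.g. on crop([[1], [-1]]): A returns none, B returns some [[1], [-1]]
import Mathlib
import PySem

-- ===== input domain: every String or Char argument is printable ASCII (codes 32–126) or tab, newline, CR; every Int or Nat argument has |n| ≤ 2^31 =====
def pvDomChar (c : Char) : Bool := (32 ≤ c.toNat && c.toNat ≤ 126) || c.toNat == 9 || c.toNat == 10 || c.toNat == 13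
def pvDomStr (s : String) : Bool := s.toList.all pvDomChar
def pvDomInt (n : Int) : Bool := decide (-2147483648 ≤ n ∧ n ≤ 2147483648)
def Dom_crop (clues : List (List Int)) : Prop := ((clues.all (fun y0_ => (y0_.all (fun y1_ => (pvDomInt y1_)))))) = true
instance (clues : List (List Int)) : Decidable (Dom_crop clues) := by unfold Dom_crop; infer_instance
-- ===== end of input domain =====

-- B replaces A's double-reversal with pop loops by one scan for the nonzero-row indices and a single
-- slice (objective: simpler); where row sums cancel to a zero total, A wrongly reports an empty grid
-- and B returns the trimmed rows (see D_crop).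


-- ===== PORT A =====
-- the 'while sum(clues[0]) == 0: clues.pop(0)' loop; the [] branch is where Python's clues[0]
-- would raise IndexError — unreachable under A's total-sum guard, which guarantees a nonzero row
def cropDrop : List (List Int) → List (List Int)
  | [] => []
  | l :: rest => if l.sum = 0 then cropDrop rest else l :: rest

def crop (clues : List (List Int)) : Option (List (List Int)) :=
  if (clues.map (fun l => l.sum)).sum = 0 then none
  else
    -- clues[::-1] is List.reverse (PySem.List.slice?_none_none_neg_one)
    let c1 := cropDrop clues.reverse
    let c2 := cropDrop c1.reverse
    some c2

-- ===== PORT B =====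
-- the comprehension [i for i, row in enumerate(clues) if sum(row) != 0] (with Python's start offset)
def nzIdx (t : List (List Int)) (s : Int) : List Int :=
  ((PySem.List.enumerate t s).filter (fun p => decide (p.2.sum ≠ 0))).map Prod.fst

def crop_alt (clues : List (List Int)) : Option (List (List Int)) :=
  match nzIdx clues 0 with
  | [] => none
  | i :: rest =>
      some (PySem.List.slice clues (some i) (some ((i :: rest).getLast (List.cons_ne_nil _ _) + 1)))

-- ===== PRECONDITION & SPEC =====
-- When the row sums cancel to a zero grand total although some row has a nonzero sum (possible only
-- with negative entries), A returns None as if the grid were empty, while B returns the rows trimmed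
-- to the first..last nonzero-sum row — the intended value, since nonzero clue rows do exist.
def D_crop (clues : List (List Int)) : Prop :=
  clues.flatten.sum = 0 ∧ ∃ r ∈ clues, r.sum ≠ 0
instance (clues : List (List Int)) : Decidable (D_crop clues) := by unfold D_crop; infer_instance

def Spec_crop (clues : List (List Int)) (out : Option (List (List Int))) : Prop :=
  ¬ D_crop clues → out = crop_alt clues
instance (clues : List (List Int)) (out : Option (List (List Int))) : Decidable (Spec_crop clues out) := by unfold Spec_crop; infer_instance

def pvDiffWitness_crop : List (List Int) := [[1], [-1]]
def pvDiffWitnessOut_crop : (Option (List (List Int))) × (Option (List (List Int))) :=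
  (none, some [[1], [-1]])

-- ===== CLAIM (what is proved, stated in full; the proofs are below) =====
def Claim_unchanged_crop : Prop := ∀ (clues : List (List Int)), Dom_crop clues → Spec_crop clues (crop clues)
def Claim_changed_crop : Prop := Dom_crop (pvDiffWitness_crop) ∧ D_crop (pvDiffWitness_crop) ∧ crop (pvDiffWitness_crop) = pvDiffWitnessOut_crop.1 ∧ crop_alt (pvDiffWitness_crop) = pvDiffWitnessOut_crop.2 ∧ pvDiffWitnessOut_crop.1 ≠ pvDiffWitnessOut_crop.2
def Claim_exact_crop : Prop := ∀ (clues : List (List Int)), Dom_crop clues → D_crop clues → crop clues ≠ crop_alt clues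

-- ===== LEMMAS AND PROOFS =====

theorem nzIdx_nil (s : Int) : nzIdx [] s = [] := rfl

theorem nzIdx_cons (a : List Int) (t : List (List Int)) (s : Int) :
    nzIdx (a :: t) s = (if a.sum ≠ 0 then [s] else []) ++ nzIdx t (s + 1) := by
  simp only [nzIdx, PySem.List.enumerate_cons, List.filter_cons]
  split_ifs with h <;> simp_all

theorem nzIdx_succ (t : List (List Int)) (s : Int) :
    nzIdx t (s + 1) = (nzIdx t s).map (· + 1) := by
  induction t generalizing s with
  | nil => rfl
  | cons a r ih =>
      rw [nzIdx_cons, nzIdx_cons, ih (s + 1), List.map_append]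
      split_ifs <;> simp

theorem nzIdx_eq_nil_iff (t : List (List Int)) (s : Int) :
    nzIdx t s = [] ↔ ∀ l ∈ t, l.sum = 0 := by
  induction t generalizing s with
  | nil => simp [nzIdx_nil]
  | cons a r ih =>
      rw [nzIdx_cons]
      by_cases h : a.sum = 0 <;> simp [h, ih]

theorem sum_map_eq_zero (t : List (List Int)) (h : ∀ l ∈ t, l.sum = 0) :
    (t.map (fun l => l.sum)).sum = 0 := by
  apply List.sum_eq_zero
  intro x hx
  obtain ⟨l, hl, rfl⟩ := List.mem_map.mp hx
  exact h l hl

theorem dropWhile_reverse_nil_of_all (t : List (List Int)) (h : ∀ l ∈ t, l.sum = 0) :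
    t.reverse.dropWhile (fun l => decide (l.sum = 0)) = [] := by
  rw [List.dropWhile_eq_nil_iff]
  intro x hx
  simpa using h x (List.mem_reverse.mp hx)

theorem cropDrop_eq_dropWhile (t : List (List Int)) :
    cropDrop t = t.dropWhile (fun l => decide (l.sum = 0)) := by
  induction t with
  | nil => rfl
  | cons a r ih =>
      by_cases h : a.sum = 0 <;> simp [cropDrop, h, ih]

-- the one combined invariant: head/last of the nonzero-index list, the trailing trim as a take,
-- and the leading trim of any long-enough prefix as a drop/take
theorem nzIdx_main (t : List (List Int)) (hex : ∃ l ∈ t, l.sum ≠ 0) :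
    ∃ i j : Nat, i ≤ j ∧
      (nzIdx t 0).head? = some (i : Int) ∧
      (nzIdx t 0).getLast? = some (j : Int) ∧
      (t.reverse.dropWhile (fun l => decide (l.sum = 0))).reverse = t.take (j + 1) ∧
      (∀ m : Nat, i < m →
        (t.take m).dropWhile (fun l => decide (l.sum = 0)) = (t.drop i).take (m - i)) := by
  induction t with
  | nil => simp at hex
  | cons a r ih =>
      by_cases hr : ∃ l ∈ r, l.sum ≠ 0
      · obtain ⟨i, j, hij, hhead, hlast, htail, hdrop⟩ := ih hr
        have hrne : r.reverse.dropWhile (fun l => decide (l.sum = 0)) ≠ [] := by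
          rw [Ne, List.dropWhile_eq_nil_iff]
          push Not
          obtain ⟨l, hl, hls⟩ := hr
          exact ⟨l, List.mem_reverse.mpr hl, by simpa using hls⟩
        have happ : (a :: r).reverse.dropWhile (fun l => decide (l.sum = 0)) =
            r.reverse.dropWhile (fun l => decide (l.sum = 0)) ++ [a] := by
          rw [List.reverse_cons, List.dropWhile_append]
          simp only [List.isEmpty_iff, if_neg hrne]
        have htail' : ((a :: r).reverse.dropWhile (fun l => decide (l.sum = 0))).reverse =
            (a :: r).take (j + 1 + 1) := by
          rw [happ, List.reverse_append, List.reverse_singleton, List.singleton_append,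
            htail, List.take_succ_cons]
        have hnzr : nzIdx r 0 ≠ [] := by
          rw [Ne, nzIdx_eq_nil_iff]
          push Not
          exact hr
        by_cases ha : a.sum = 0
        · refine ⟨i + 1, j + 1, by omega, ?_, ?_, by exact_mod_cast htail', ?_⟩
          · rw [nzIdx_cons, if_neg (by simpa using ha), List.nil_append,
              show (0 : Int) + 1 = 0 + 1 from rfl, nzIdx_succ, List.head?_map, hhead]
            simp
          · rw [nzIdx_cons, if_neg (by simpa using ha), List.nil_append, nzIdx_succ,
              List.getLast?_map, hlast]
            simp
          · intro m hm
            match m, hm with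
            | m + 1, hm =>
              rw [List.take_succ_cons, List.dropWhile_cons_of_pos (by simpa using ha),
                hdrop m (by omega)]
              simp only [List.drop_succ_cons]
              congr 1
              omega
        · refine ⟨0, j + 1, by omega, ?_, ?_, by exact_mod_cast htail', ?_⟩
          · rw [nzIdx_cons, if_pos ha]
            rfl
          · rw [nzIdx_cons, if_pos ha, show (0 : Int) + 1 = 0 + 1 from rfl, nzIdx_succ,
              List.getLast?_append, List.getLast?_map, hlast]
            simp
          · intro m hm
            match m, hm with
            | m + 1, _ =>
              rw [List.take_succ_cons, List.dropWhile_cons_of_neg (by simpa using ha)]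
              simp
      · -- r is all zero-sum rows, so a is the nonzero row
        push Not at hr
        have ha : a.sum ≠ 0 := by
          obtain ⟨l, hl, hls⟩ := hex
          rcases List.mem_cons.mp hl with rfl | hl'
          · exact hls
          · exact absurd (hr l hl') hls
        refine ⟨0, 0, le_refl 0, ?_, ?_, ?_, ?_⟩
        · rw [nzIdx_cons, if_pos ha]
          rfl
        · rw [nzIdx_cons, if_pos ha, show (0 : Int) + 1 = 0 + 1 from rfl, nzIdx_succ,
            (nzIdx_eq_nil_iff r 0).mpr hr]
          rfl
        · rw [List.reverse_cons, List.dropWhile_append, dropWhile_reverse_nil_of_all r hr]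
          simp [ha]
        · intro m hm
          match m, hm with
          | m + 1, _ =>
            rw [List.take_succ_cons, List.dropWhile_cons_of_neg (by simpa using ha)]
            simp

-- ===== VERDICT (by name: the statement is the Claim_ definition above) =====
theorem crop_spec : Claim_unchanged_crop := by
  intro clues _ hnd
  by_cases hall : ∀ l ∈ clues, l.sum = 0
  · -- both report an empty grid
    have htot : (clues.map (fun l => l.sum)).sum = 0 := sum_map_eq_zero clues hall
    have hnz : nzIdx clues 0 = [] := (nzIdx_eq_nil_iff clues 0).mpr hall
    simp [crop, htot, crop_alt, hnz]
  · push Not at hall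
    have htot : (clues.map (fun l => l.sum)).sum ≠ 0 := by
      intro h
      exact hnd ⟨by rw [List.sum_flatten]; exact h, hall⟩
    obtain ⟨i, j, hij, hhead, hlast, htail, hdrop⟩ := nzIdx_main clues hall
    -- evaluate B
    have hA : crop clues =
        some ((clues.reverse.dropWhile (fun l => decide (l.sum = 0))).reverse.dropWhile
          (fun l => decide (l.sum = 0))) := by
      simp [crop, htot, cropDrop_eq_dropWhile]
    rcases hnzl : nzIdx clues 0 with _ | ⟨i', rest⟩
    · rw [hnzl] at hhead; simp at hhead
    · have hi' : i' = (i : Int) := by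
        rw [hnzl] at hhead; simpa using hhead
      subst hi'
      have hj' : (((i : Nat) : Int) :: rest).getLast (List.cons_ne_nil _ _) = (j : Int) := by
        have := List.getLast?_eq_some_getLast (l := ((i : Nat) : Int) :: rest) (List.cons_ne_nil _ _)
        rw [hnzl] at hlast
        rw [this] at hlast
        simpa using hlast
      have hB : crop_alt clues =
          some (PySem.List.slice clues (some (i : Int)) (some ((j : Int) + 1))) := by
        simp only [crop_alt, hnzl, hj']
      rw [hA, hB, PySem.List.slice_toNat clues (by positivity) (by positivity)]
      have h1 : ((i : Int)).toNat = i := by simp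
      have h2 : ((j : Int) + 1).toNat = j + 1 := by omega
      rw [h1, h2, htail, hdrop (j + 1) (by omega)]

theorem crop_changed : Claim_changed_crop := by unfold Claim_changed_crop; decide

theorem crop_tight : Claim_exact_crop := by
  intro clues _ hd
  obtain ⟨htot, hex⟩ := hd
  have htot' : (clues.map (fun l => l.sum)).sum = 0 := by
    rw [← List.sum_flatten]; exact htot
  have hA : crop clues = none := by simp [crop, htot']
  have hnz : nzIdx clues 0 ≠ [] := by
    rw [Ne, nzIdx_eq_nil_iff]
    push Not
    exact hex
  rw [hA]
  rcases hnzl : nzIdx clues 0 with _ | ⟨i', rest⟩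
  · exact absurd hnzl hnz
  · simp only [crop_alt, hnzl]
    simp
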